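-- pv_equiv track=rewrite | github.com/watermarkhu/qsurface | mop_growth/plot_mopgrowth_buckets.py | get_bucket
-- ===== SOURCE A (Python) =====
-- def get_bucket(size, support, values):
--     if support:
--         bucket = values[size-1] + size - 2
--     else:
--         if size < values[0]:
--             bucket = size - 1
--         else:
--             for i, val in enumerate(values):
--                 if size >= val and size < values[i+1]:
--                     bucket = i + size
--                     break
--     return bucket
-- ===== SOURCE B (Python) =====
-- def get_bucket(size, support, values):
--     if support:
--         return values[size - 1] + size - 2
--     if size < values[0]:
--         return size - 1
--     # binary search for the first index with values[index] > size (upper bound)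
--     lo, hi = 0, len(values)
--     while lo < hi:
--         mid = (lo + hi) // 2
--         if values[mid] <= size:
--             lo = mid + 1
--         else:
--             hi = mid
--     return lo - 1 + size
-- ===== Notes on version B (the rewrite author's own statement) =====
-- stated objective: alternative
-- what changed: The linear first-match scan over the sorted thresholds is replaced by a hand-written binary search for the upper bound (first value > size), a different search strategy over the same thresholds; no speed claim is made.
-- outside the precondition, e.g. on get_bucket(5, False, [0, 10, 3, 20]): A returns 5, B returns 7
import Mathlib
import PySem

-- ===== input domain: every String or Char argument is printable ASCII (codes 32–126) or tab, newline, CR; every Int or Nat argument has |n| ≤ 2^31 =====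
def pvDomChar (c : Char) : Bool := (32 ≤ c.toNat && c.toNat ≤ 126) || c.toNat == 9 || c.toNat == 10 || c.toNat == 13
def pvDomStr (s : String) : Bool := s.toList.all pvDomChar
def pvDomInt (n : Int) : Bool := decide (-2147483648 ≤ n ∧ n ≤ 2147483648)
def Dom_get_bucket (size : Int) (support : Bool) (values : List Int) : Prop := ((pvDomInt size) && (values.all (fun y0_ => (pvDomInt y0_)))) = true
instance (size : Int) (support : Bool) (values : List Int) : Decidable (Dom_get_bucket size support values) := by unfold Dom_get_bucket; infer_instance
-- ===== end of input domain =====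

-- B replaces A's linear first-match scan over the sorted thresholds by an upper-bound binary search
-- (alternative algorithm; no speed claim).

-- ===== PORT A =====
-- the 'for i, val in enumerate(values)' loop with break, as recursion on the index i
def get_bucket_loop (size : Int) (values : List Int) (i : Nat) : Int :=
  if _h : i < values.length then
    let val := values.getD i 0
    if val ≤ size then                                  -- 'size >= val'
      match PySem.List.pyGet? values ((i : Int) + 1) with
      | none => 0                                       -- IndexError; excluded by Pre_get_bucket
      | some next => if size < next then (i : Int) + size else get_bucket_loop size values (i + 1)
    else get_bucket_loop size values (i + 1)
  else 0                                                -- loop finished: 'bucket' unbound; excluded by Pre_get_bucket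
termination_by values.length - i

def get_bucket (size : Int) (support : Bool) (values : List Int) : Int :=
  if support then
    (PySem.List.pyGet? values (size - 1)).getD 0 + size - 2   -- values[size-1] + size - 2 (IndexError excluded by Pre_)
  else
    if size < (PySem.List.pyGet? values 0).getD 0 then size - 1   -- values[0] (IndexError on [] excluded by Pre_)
    else get_bucket_loop size values 0

-- ===== PORT B =====
-- the 'while lo < hi' binary search; fuel = hi - lo only makes the recursion structural (it never runs out)
def get_bucket_bsearch (size : Int) (values : List Int) : Nat → Nat → Nat → Nat
  | 0, lo, _ => lo
  | fuel + 1, lo, hi =>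
    if lo < hi then
      let mid := (lo + hi) / 2
      if values.getD mid 0 ≤ size then get_bucket_bsearch size values fuel (mid + 1) hi
      else get_bucket_bsearch size values fuel lo mid
    else lo

def get_bucket_alt (size : Int) (support : Bool) (values : List Int) : Int :=
  if support then
    (PySem.List.pyGet? values (size - 1)).getD 0 + size - 2
  else if size < (PySem.List.pyGet? values 0).getD 0 then size - 1
  else (get_bucket_bsearch size values values.length 0 values.length : Int) - 1 + size

-- ===== PRECONDITION & SPEC =====
-- Pre_ excludes inputs where A raises (support index out of range; empty values; size not bracketed by any
-- adjacent pair) and, in the non-support branch, unsorted values lists, on which the value of A's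
-- first-match linear scan is an accident of traversal order that a binary search need not reproduce.
def Pre_get_bucket (size : Int) (support : Bool) (values : List Int) : Prop :=
  if support then PySem.Raise.InRange values.length (size - 1)
  else values ≠ [] ∧ (size < values.getD 0 0 ∨
    (List.Pairwise (· ≤ ·) values ∧ size < values.getD (values.length - 1) 0))
instance (size : Int) (support : Bool) (values : List Int) : Decidable (Pre_get_bucket size support values) := by unfold Pre_get_bucket; infer_instance

def pvWitness_get_bucket : Int × Bool × List Int := (4, false, [2, 3, 9])

def Spec_get_bucket (size : Int) (support : Bool) (values : List Int) (out : Int) : Prop := out = get_bucket_alt size support values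
instance (size : Int) (support : Bool) (values : List Int) (out : Int) : Decidable (Spec_get_bucket size support values out) := by unfold Spec_get_bucket; infer_instance

-- ===== CLAIM (what is proved, stated in full; the proofs are below) =====
def Claim_equal_get_bucket : Prop := ∀ (size : Int) (support : Bool) (values : List Int), Dom_get_bucket size support values → Pre_get_bucket size support values → Spec_get_bucket size support values (get_bucket size support values)


-- ===== LEMMAS AND PROOFS =====

lemma sorted_getD_mono (values : List Int) (hs : List.Pairwise (· ≤ ·) values)
    {i j : Nat} (hij : i ≤ j) (hj : j < values.length) :
    values.getD i 0 ≤ values.getD j 0 := by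
  rcases Nat.lt_or_ge i j with h | h
  · rw [List.getD_eq_getElem _ _ (lt_of_le_of_lt hij hj), List.getD_eq_getElem _ _ hj]
    exact (List.pairwise_iff_getElem.mp hs) i j _ _ h
  · have : i = j := le_antisymm hij h
    subst this; exact le_refl _

-- characterisation of the binary search: its result r has values[i] ≤ size for all i < r
-- and size < values[r] if r < len (given sortedness and the loop invariants)
lemma bsearch_spec (size : Int) (values : List Int) (hs : List.Pairwise (· ≤ ·) values) :
    ∀ (fuel lo hi : Nat), hi - lo ≤ fuel → lo ≤ hi → hi ≤ values.length →
    (∀ i < lo, values.getD i 0 ≤ size) →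
    (∀ i, hi ≤ i → i < values.length → size < values.getD i 0) →
    lo ≤ get_bucket_bsearch size values fuel lo hi ∧
    get_bucket_bsearch size values fuel lo hi ≤ hi ∧
    (∀ i < get_bucket_bsearch size values fuel lo hi, values.getD i 0 ≤ size) ∧
    (get_bucket_bsearch size values fuel lo hi < values.length →
      size < values.getD (get_bucket_bsearch size values fuel lo hi) 0) := by
  intro fuel
  induction fuel with
  | zero =>
    intro lo hi hfuel h1 h2 hlow hhigh
    have hle : lo = hi := by omega
    subst hle
    exact ⟨le_refl _, le_refl _, hlow, fun h => hhigh lo (le_refl _) h⟩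
  | succ fuel ih =>
    intro lo hi hfuel h1 h2 hlow hhigh
    by_cases h : lo < hi
    · have hmid1 : lo ≤ (lo + hi) / 2 := by omega
      have hmid2 : (lo + hi) / 2 < hi := by omega
      simp only [get_bucket_bsearch, if_pos h]
      by_cases hc : values.getD ((lo + hi) / 2) 0 ≤ size
      · simp only [if_pos hc]
        refine (ih ((lo + hi) / 2 + 1) hi (by omega) (by omega) h2 ?_ hhigh).imp (by omega) id
        intro i hi'
        exact le_trans (sorted_getD_mono values hs (by omega) (by omega)) hc
      · simp only [if_neg hc]
        refine (ih lo ((lo + hi) / 2) (by omega) (by omega) (by omega) hlow ?_).imp id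
          (fun x => x.imp (by omega) id)
        intro i hi1 hi2
        exact lt_of_not_ge fun hle => hc (le_trans (sorted_getD_mono values hs hi1 hi2) hle)
    · simp only [get_bucket_bsearch, if_neg h]
      have hle : lo = hi := by omega
      subst hle
      exact ⟨le_refl _, le_refl _, hlow, fun h' => hhigh lo (le_refl _) h'⟩

-- A's scan, started at any k ≤ p-1, breaks exactly at p-1 when values[i] ≤ size for i < p and size < values[p]
lemma loop_eq (size : Int) (values : List Int) (p : Nat)
    (hp1 : 1 ≤ p) (hplen : p < values.length)
    (hlow : ∀ i < p, values.getD i 0 ≤ size)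
    (hhigh : size < values.getD p 0) :
    ∀ k, k ≤ p - 1 → get_bucket_loop size values k = (p : Int) - 1 + size := by
  intro k hk
  rw [get_bucket_loop]
  have hklen : k < values.length := by omega
  rw [dif_pos hklen]
  have hval : values.getD k 0 ≤ size := hlow k (by omega)
  rw [if_pos hval]
  have hk1 : k + 1 < values.length := by omega
  have hget : PySem.List.pyGet? values ((k : Int) + 1) = some (values.getD (k + 1) 0) := by
    have : ((k : Int) + 1) = ((k + 1 : Nat) : Int) := by push_cast; ring
    rw [this, PySem.List.pyGet?_natCast, List.getElem?_eq_getElem hk1,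
      List.getD_eq_getElem _ _ hk1]
  rw [hget]; dsimp only
  by_cases hbr : k = p - 1
  · subst hbr
    have hpe : p - 1 + 1 = p := by omega
    rw [hpe]
    rw [if_pos hhigh]
    have : ((p - 1 : Nat) : Int) = (p : Int) - 1 := by omega
    rw [this]
  · have hnext : values.getD (k + 1) 0 ≤ size := hlow (k + 1) (by omega)
    rw [if_neg (not_lt.mpr hnext)]
    exact loop_eq size values p hp1 hplen hlow hhigh (k + 1) (by omega)
termination_by k => p - 1 - k
decreasing_by omega

-- the non-support, size ≥ values[0] case, packaged once for both theorems
lemma bsearch_bracket (size : Int) (values : List Int)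
    (hne : values ≠ []) (hs : List.Pairwise (· ≤ ·) values)
    (hlast : size < values.getD (values.length - 1) 0)
    (h0 : values.getD 0 0 ≤ size) :
    1 ≤ get_bucket_bsearch size values values.length 0 values.length ∧
    get_bucket_bsearch size values values.length 0 values.length < values.length ∧
    (∀ i < get_bucket_bsearch size values values.length 0 values.length, values.getD i 0 ≤ size) ∧
    size < values.getD (get_bucket_bsearch size values values.length 0 values.length) 0 := by
  have hlen : 0 < values.length := List.length_pos_iff.mpr hne
  obtain ⟨-, hr2, hlow, hhigh⟩ :=
    bsearch_spec size values hs values.length 0 values.length (by omega) (by omega) (le_refl _)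
      (by omega) (by omega)
  set r := get_bucket_bsearch size values values.length 0 values.length with hr
  have hrlen : r < values.length := by
    by_contra hcon
    have : r = values.length := by omega
    exact absurd (hlow (values.length - 1) (by omega)) (not_le.mpr hlast)
  have hr1 : 1 ≤ r := by
    by_contra hcon
    have : r = 0 := by omega
    exact absurd h0 (not_le.mpr (this ▸ hhigh hrlen))
  exact ⟨hr1, hrlen, hlow, hhigh hrlen⟩

lemma head_getD (values : List Int) (hne : values ≠ []) :
    (PySem.List.pyGet? values 0).getD 0 = values.getD 0 0 := by
  have hlen : 0 < values.length := List.length_pos_iff.mpr hne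
  rw [PySem.List.pyGet?_zero, List.getElem?_eq_getElem hlen, List.getD_eq_getElem _ _ hlen]
  rfl

-- ===== VERDICT (by name: the statement is the Claim_ definition above) =====
theorem get_bucket_spec : Claim_equal_get_bucket := by
  intro size support values _hdom hpre
  unfold Spec_get_bucket
  cases support with
  | true => rfl
  | false =>
    unfold Pre_get_bucket at hpre
    simp only [Bool.false_eq_true, if_false] at hpre
    obtain ⟨hne, hcase⟩ := hpre
    unfold get_bucket get_bucket_alt
    simp only [Bool.false_eq_true, if_false]
    by_cases hlt : size < (PySem.List.pyGet? values 0).getD 0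
    · rw [if_pos hlt, if_pos hlt]
    · rw [if_neg hlt, if_neg hlt]
      have h0 : values.getD 0 0 ≤ size := by
        rw [← head_getD values hne]; exact not_lt.mp hlt
      rcases hcase with h | ⟨hs, hlast⟩
      · exact absurd h (not_lt.mpr h0)
      obtain ⟨hr1, hrlen, hlow, hhigh⟩ := bsearch_bracket size values hne hs hlast h0
      rw [loop_eq size values _ hr1 hrlen hlow hhigh 0 (by omega)]
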